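-- pv_equiv track=rewrite | github.com/ASEM000/pytreeclass | pytreeclass/_src/tree_pprint.py | _sibling_nodes_count_at_all_depth
-- ===== SOURCE A (Python) =====
-- from typing import Any, Callable, Literal
--
-- def _sibling_nodes_count_at_all_depth(lhs_trace, traces: tuple[Any]) -> list[int]:
--     # given a trace and a list of traces, we count the number of nodes
--     # at each depth that are siblings of the lhs_trace
--     def sibling_nodes_count_at_depth(lhs_trace: Any, traces: tuple[Any], depth: int):
--         result = set()
--         start = False
--         for trace in traces:
--             _, __, indices, ___ = trace
--             if len(indices) > depth and indices[:depth] == lhs_trace[2][:depth]: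
--                 start = True
--                 # mere existence of a name at a given depth means
--                 # that there is a node at that depth
--                 result.add(indices[: depth + 1])
--             elif start is True:
--                 # we already found the first sibling, so if we are here
--                 # it means that we have reached the end of the siblings
--                 break
--         return len(result)
--
--     depth, result = 0, []
--     while True:
--         if (out := sibling_nodes_count_at_depth(lhs_trace, traces, depth=depth)) == 0:
--             break
--         else:
--             result += [out]
--             depth += 1
--     return result
-- ===== SOURCE B (Python) =====
-- def _sibling_nodes_count_at_all_depth(lhs_trace, traces):
--     # B: precompute each trace's common-prefix length with lhs once (O(N*D)),
--     # then per depth locate the first sibling block with O(1) tests and count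
--     # distinct child indices (scalars) instead of re-slicing prefixes.
--     lhs_indices = lhs_trace[2]
--     meta = []
--     for trace in traces:
--         indices = trace[2]
--         k = 0
--         while k < len(indices) and k < len(lhs_indices) and indices[k] == lhs_indices[k]:
--             k += 1
--         meta.append((k, indices))
--     n = len(meta)
--     result = []
--     for depth in range(len(lhs_indices) + 1):
--         i = 0
--         while i < n and not (meta[i][0] >= depth and len(meta[i][1]) > depth):
--             i += 1
--         if i == n:
--             break
--         seen = set()
--         while i < n and meta[i][0] >= depth and len(meta[i][1]) > depth:
--             seen.add(meta[i][1][depth])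
--             i += 1
--         result.append(len(seen))
--     return result
-- ===== Notes on version B (the rewrite author's own statement) =====
-- stated objective: faster
-- what changed: B precomputes each trace's common-prefix length with lhs_trace once, then per depth locates the first sibling block with O(1) scalar tests and counts distinct depth-d child indices in a set of ints, instead of A's per-depth tuple re-slicing and set of prefix tuples.
import Mathlib
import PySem

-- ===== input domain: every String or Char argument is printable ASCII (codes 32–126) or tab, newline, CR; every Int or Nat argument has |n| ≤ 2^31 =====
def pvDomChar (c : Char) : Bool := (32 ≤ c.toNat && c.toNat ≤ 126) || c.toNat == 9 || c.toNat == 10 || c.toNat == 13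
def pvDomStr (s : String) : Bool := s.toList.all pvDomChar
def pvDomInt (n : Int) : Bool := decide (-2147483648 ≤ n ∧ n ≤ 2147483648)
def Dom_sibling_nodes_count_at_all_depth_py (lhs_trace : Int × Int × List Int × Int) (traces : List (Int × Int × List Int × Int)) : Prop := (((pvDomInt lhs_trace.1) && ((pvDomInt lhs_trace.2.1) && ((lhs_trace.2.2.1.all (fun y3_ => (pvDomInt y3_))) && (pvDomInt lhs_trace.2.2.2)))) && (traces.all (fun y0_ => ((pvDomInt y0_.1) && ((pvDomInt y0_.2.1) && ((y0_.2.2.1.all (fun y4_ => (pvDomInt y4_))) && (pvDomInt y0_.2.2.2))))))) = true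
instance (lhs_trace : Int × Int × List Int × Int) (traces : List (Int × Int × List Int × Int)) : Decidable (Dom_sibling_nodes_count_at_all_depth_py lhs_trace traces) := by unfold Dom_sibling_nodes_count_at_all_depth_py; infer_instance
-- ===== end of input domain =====

-- B replaces A's per-depth prefix re-slicing (O(N*D^2)) by a one-pass precomputation of each
-- trace's common-prefix length with lhs_trace, then per-depth O(1) scalar tests (O(N*D); measured faster).

-- ===== PORT A =====
-- inner function sibling_nodes_count_at_depth: a for-loop with a break over traces,
-- accumulating a set of prefix tuples and a 'start' flag; returns the final set.
-- Python's indices[:d] for a Nat counter d is List.take d (exact: PySem.List.slice_to_natCast).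
def pvA_scan (lhsIdx : List Int) (d : Nat) :
    List (Int × Int × List Int × Int) → PySem.Set (List Int) → Bool → PySem.Set (List Int)
  | [], res, _ => res
  | t :: ts, res, start =>
    if d < t.2.2.1.length ∧ t.2.2.1.take d = lhsIdx.take d then
      pvA_scan lhsIdx d ts (PySem.Set.add res (t.2.2.1.take (d + 1))) true
    else if start = true then
      res
    else
      pvA_scan lhsIdx d ts res start

-- termination helper for A's 'while True' loop: a nonzero count means some trace
-- matched at this depth, which forces d ≤ lhsIdx.length (cited in decreasing_by).
theorem pvA_scan_len_ne (lhsIdx : List Int) (d : Nat) :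
    ∀ (ts : List (Int × Int × List Int × Int)) (res : PySem.Set (List Int)) (start : Bool),
      (pvA_scan lhsIdx d ts res start).length ≠ res.length →
      ∃ t ∈ ts, d < t.2.2.1.length ∧ t.2.2.1.take d = lhsIdx.take d := by
  intro ts
  induction ts with
  | nil => intro res start h; simp [pvA_scan] at h
  | cons t ts ih =>
    intro res start h
    by_cases hp : d < t.2.2.1.length ∧ t.2.2.1.take d = lhsIdx.take d
    · exact ⟨t, List.mem_cons_self, hp⟩
    · simp only [pvA_scan, if_neg hp] at h
      cases start with
      | true => simp at h
      | false =>
        obtain ⟨u, hu, hq⟩ := ih res false (by simpa using h)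
        exact ⟨u, List.mem_cons_of_mem _ hu, hq⟩

theorem pvA_depth_le (lhsIdx : List Int) (d : Nat) (traces : List (Int × Int × List Int × Int))
    (h : (pvA_scan lhsIdx d traces PySem.Set.empty false).length ≠ 0) : d ≤ lhsIdx.length := by
  obtain ⟨t, _, hlt, htake⟩ := pvA_scan_len_ne lhsIdx d traces PySem.Set.empty false (by simpa [PySem.Set.empty] using h)
  have h1 : (t.2.2.1.take d).length = d := by simp [List.length_take]; omega
  have h2 : (lhsIdx.take d).length = min d lhsIdx.length := List.length_take
  rw [htake, h2] at h1
  omega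

-- the outer 'while True' loop of A: count at this depth; stop at 0, else append and go deeper
def pvA_loop (lhsIdx : List Int) (traces : List (Int × Int × List Int × Int)) (d : Nat) : List Int :=
  let out := (pvA_scan lhsIdx d traces PySem.Set.empty false).length
  if h : out = 0 then []
  else (out : Int) :: pvA_loop lhsIdx traces (d + 1)
termination_by lhsIdx.length + 1 - d
decreasing_by
  have := pvA_depth_le lhsIdx d traces h
  omega

def sibling_nodes_count_at_all_depth_py (lhs_trace : Int × Int × List Int × Int) (traces : List (Int × Int × List Int × Int)) : List Int :=
  pvA_loop lhs_trace.2.2.1 traces 0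

-- ===== PORT B =====
-- the inner while-loop computing k = common prefix length of indices and lhs_indices
def pvB_lcp : List Int → List Int → Nat
  | a :: as, b :: bs => if a = b then pvB_lcp as bs + 1 else 0
  | _, _ => 0

-- the first while-loop of a depth iteration: advance i past non-matching entries
def pvB_skip (d : Nat) : List (Nat × List Int) → List (Nat × List Int)
  | [] => []
  | m :: rest => if d ≤ m.1 ∧ d < m.2.length then m :: rest else pvB_skip d rest

-- the second while-loop: collect indices[depth] of the contiguous matching block
-- (meta[i][1][depth] is in range inside the branch, so getD is exact)
def pvB_run (d : Nat) : List (Nat × List Int) → PySem.Set Int → PySem.Set Int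
  | [], s => s
  | m :: rest, s =>
    if d ≤ m.1 ∧ d < m.2.length then pvB_run d rest (PySem.Set.add s (m.2.getD d 0)) else s

-- the 'for depth in range(len(lhs_indices)+1)' loop with its two breaks
def pvB_loop (ms : List (Nat × List Int)) : Nat → Nat → List Int
  | 0, _ => []
  | r + 1, d =>
    let rest := pvB_skip d ms
    if rest = [] then []
    else ((pvB_run d rest PySem.Set.empty).length : Int) :: pvB_loop ms r (d + 1)

def sibling_nodes_count_at_all_depth_py_alt (lhs_trace : Int × Int × List Int × Int) (traces : List (Int × Int × List Int × Int)) : List Int :=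
  pvB_loop (traces.map (fun t => (pvB_lcp t.2.2.1 lhs_trace.2.2.1, t.2.2.1)))
    (lhs_trace.2.2.1.length + 1) 0

-- ===== PRECONDITION & SPEC =====
def Spec_sibling_nodes_count_at_all_depth_py (lhs_trace : Int × Int × List Int × Int) (traces : List (Int × Int × List Int × Int)) (out : List Int) : Prop := out = sibling_nodes_count_at_all_depth_py_alt lhs_trace traces
instance (lhs_trace : Int × Int × List Int × Int) (traces : List (Int × Int × List Int × Int)) (out : List Int) : Decidable (Spec_sibling_nodes_count_at_all_depth_py lhs_trace traces out) := by unfold Spec_sibling_nodes_count_at_all_depth_py; infer_instance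

-- ===== CLAIM (what is proved, stated in full; the proofs are below) =====
def Claim_equal_sibling_nodes_count_at_all_depth_py : Prop := ∀ (lhs_trace : Int × Int × List Int × Int) (traces : List (Int × Int × List Int × Int)), Dom_sibling_nodes_count_at_all_depth_py lhs_trace traces → Spec_sibling_nodes_count_at_all_depth_py lhs_trace traces (sibling_nodes_count_at_all_depth_py lhs_trace traces)

-- ===== LEMMAS AND PROOFS =====

-- k ≥ d iff the length-d prefixes agree and both lists have at least d elements
theorem pvB_lcp_ge_iff : ∀ (a b : List Int) (d : Nat),
    d ≤ pvB_lcp a b ↔ (a.take d = b.take d ∧ d ≤ a.length ∧ d ≤ b.length) := by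
  intro a
  induction a with
  | nil => intro b d; cases b <;> cases d <;> simp [pvB_lcp]
  | cons x as ih =>
    intro b d
    cases b with
    | nil => cases d <;> simp [pvB_lcp]
    | cons y bs =>
      cases d with
      | zero => simp
      | succ d =>
        by_cases hxy : x = y
        · subst hxy
          simp [pvB_lcp, ih bs d]
        · simp [pvB_lcp, hxy]

-- B's scalar test 'k ≥ depth and len > depth' equals A's prefix test
theorem pvQ_iff (lhsIdx idx : List Int) (d : Nat) :
    (d ≤ pvB_lcp idx lhsIdx ∧ d < idx.length) ↔ (d < idx.length ∧ idx.take d = lhsIdx.take d) := by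
  constructor
  · rintro ⟨hk, hl⟩
    exact ⟨hl, ((pvB_lcp_ge_iff idx lhsIdx d).mp hk).1⟩
  · rintro ⟨hl, ht⟩
    have h1 : (idx.take d).length = d := by simp [List.length_take]; omega
    have h2 : (lhsIdx.take d).length = min d lhsIdx.length := List.length_take
    rw [ht, h2] at h1
    refine ⟨(pvB_lcp_ge_iff idx lhsIdx d).mpr ⟨ht, by omega, by omega⟩, hl⟩

-- adding pre ++ [x] to the image of a set under (pre ++ [·]) is the image of adding x
theorem pvSet_add_map (pre : List Int) (S : PySem.Set Int) (x : Int) :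
    PySem.Set.add (S.map fun y => pre ++ [y]) (pre ++ [x]) =
      (PySem.Set.add S x).map fun y => pre ++ [y] := by
  have hmem : ((pre ++ [x]) ∈ S.map fun y => pre ++ [y]) ↔ x ∈ S := by
    simp [List.mem_map]
  by_cases hx : x ∈ S
  · simp [PySem.Set.add, PySem.Set.contains, hmem, hx]
  · simp [PySem.Set.add, PySem.Set.contains, hmem, hx]

-- for a matching trace, the stored prefix is the shared lhs prefix plus the depth-d entry
theorem pvTake_succ_eq (lhsIdx idx : List Int) (d : Nat)
    (hl : d < idx.length) (ht : idx.take d = lhsIdx.take d) :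
    idx.take (d + 1) = lhsIdx.take d ++ [idx.getD d 0] := by
  rw [List.take_add_one, ht, List.getD]
  simp [List.getElem?_eq_getElem hl]

-- started phase: A's flagged scan is the image of B's block collection
theorem pvScan_run (lhsIdx : List Int) (d : Nat) :
    ∀ (ts : List (Int × Int × List Int × Int)) (S : PySem.Set Int),
      pvA_scan lhsIdx d ts (S.map fun y => lhsIdx.take d ++ [y]) true =
        (pvB_run d (ts.map fun t => (pvB_lcp t.2.2.1 lhsIdx, t.2.2.1)) S).map
          fun y => lhsIdx.take d ++ [y] := by
  intro ts
  induction ts with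
  | nil => intro S; simp [pvA_scan, pvB_run]
  | cons t ts ih =>
    intro S
    by_cases hp : d < t.2.2.1.length ∧ t.2.2.1.take d = lhsIdx.take d
    · have hq : d ≤ pvB_lcp t.2.2.1 lhsIdx ∧ d < t.2.2.1.length :=
        (pvQ_iff lhsIdx t.2.2.1 d).mpr hp
      simp only [pvA_scan, if_pos hp, List.map_cons, pvB_run, if_pos hq]
      rw [pvTake_succ_eq lhsIdx t.2.2.1 d hp.1 hp.2, pvSet_add_map]
      exact ih (PySem.Set.add S (t.2.2.1.getD d 0))
    · have hq : ¬(d ≤ pvB_lcp t.2.2.1 lhsIdx ∧ d < t.2.2.1.length) := by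
        intro h; exact hp ((pvQ_iff lhsIdx t.2.2.1 d).mp h)
      simp [pvA_scan, if_neg hp, pvB_run, if_neg hq]

-- per-depth: A's whole scan equals B's skip-then-collect, up to the prefix image
theorem pvScan_eq (lhsIdx : List Int) (d : Nat) :
    ∀ (ts : List (Int × Int × List Int × Int)),
      pvA_scan lhsIdx d ts PySem.Set.empty false =
        (pvB_run d (pvB_skip d (ts.map fun t => (pvB_lcp t.2.2.1 lhsIdx, t.2.2.1))) PySem.Set.empty).map
          fun y => lhsIdx.take d ++ [y] := by
  intro ts
  induction ts with
  | nil => simp [pvA_scan, pvB_skip, pvB_run, PySem.Set.empty]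
  | cons t ts ih =>
    by_cases hp : d < t.2.2.1.length ∧ t.2.2.1.take d = lhsIdx.take d
    · have hq : d ≤ pvB_lcp t.2.2.1 lhsIdx ∧ d < t.2.2.1.length :=
        (pvQ_iff lhsIdx t.2.2.1 d).mpr hp
      simp only [pvA_scan, if_pos hp, List.map_cons, pvB_skip, if_pos hq, pvB_run]
      have hadd : PySem.Set.add (PySem.Set.empty : PySem.Set (List Int)) (t.2.2.1.take (d + 1)) =
          ((PySem.Set.add PySem.Set.empty (t.2.2.1.getD d 0) : PySem.Set Int).map
            fun y => lhsIdx.take d ++ [y]) := by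
        rw [pvTake_succ_eq lhsIdx t.2.2.1 d hp.1 hp.2]
        have : (PySem.Set.empty : PySem.Set (List Int)) =
            ((PySem.Set.empty : PySem.Set Int).map fun y => lhsIdx.take d ++ [y]) := by
          simp [PySem.Set.empty]
        rw [this, pvSet_add_map]
      rw [hadd]
      exact pvScan_run lhsIdx d ts _
    · have hq : ¬(d ≤ pvB_lcp t.2.2.1 lhsIdx ∧ d < t.2.2.1.length) := by
        intro h; exact hp ((pvQ_iff lhsIdx t.2.2.1 d).mp h)
      simp only [pvA_scan, if_neg hp, List.map_cons, pvB_skip, if_neg hq]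
      simpa using ih

-- Set.add never shrinks, so pvB_run never shrinks the set
theorem pvRun_len_ge (d : Nat) :
    ∀ (l : List (Nat × List Int)) (S : PySem.Set Int), S.length ≤ (pvB_run d l S).length := by
  intro l
  induction l with
  | nil => intro S; simp [pvB_run]
  | cons m rest ih =>
    intro S
    simp only [pvB_run]
    split_ifs with h
    · have h1 : S.length ≤ (PySem.Set.add S (m.2.getD d 0)).length := by
        simp only [PySem.Set.add]
        split_ifs <;> simp
      exact le_trans h1 (ih _)
    · exact le_rfl

-- a nonempty skip result starts with a matching entry, so the block count is positive
theorem pvSkip_head (d : Nat) :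
    ∀ (l : List (Nat × List Int)), pvB_skip d l = [] ∨
      ∃ m rest, pvB_skip d l = m :: rest ∧ d ≤ m.1 ∧ d < m.2.length := by
  intro l
  induction l with
  | nil => exact Or.inl rfl
  | cons m rest ih =>
    by_cases h : d ≤ m.1 ∧ d < m.2.length
    · exact Or.inr ⟨m, rest, by simp [pvB_skip, if_pos h], h⟩
    · simpa [pvB_skip, if_neg h] using ih

theorem pvRun_pos (d : Nat) (l : List (Nat × List Int)) (h : pvB_skip d l ≠ []) :
    1 ≤ (pvB_run d (pvB_skip d l) PySem.Set.empty).length := by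
  rcases pvSkip_head d l with he | ⟨m, rest, heq, hq⟩
  · exact absurd he h
  · rw [heq]
    simp only [pvB_run, if_pos hq]
    have : (PySem.Set.add (PySem.Set.empty : PySem.Set Int) (m.2.getD d 0)).length = 1 := by
      simp [PySem.Set.add, PySem.Set.contains, PySem.Set.empty]
    calc 1 = (PySem.Set.add (PySem.Set.empty : PySem.Set Int) (m.2.getD d 0)).length := this.symm
      _ ≤ _ := pvRun_len_ge d rest _

-- the two outer loops agree as long as the remaining range covers all live depths
theorem pvLoop_eq (lhsIdx : List Int) (traces : List (Int × Int × List Int × Int)) :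
    ∀ (r d : Nat), d + r = lhsIdx.length + 1 →
      pvA_loop lhsIdx traces d =
        pvB_loop (traces.map fun t => (pvB_lcp t.2.2.1 lhsIdx, t.2.2.1)) r d := by
  intro r
  induction r with
  | zero =>
    intro d hd
    have h0 : (pvA_scan lhsIdx d traces PySem.Set.empty false).length = 0 := by
      by_contra h
      have := pvA_depth_le lhsIdx d traces h
      omega
    rw [pvA_loop, dif_pos h0]
    rfl
  | succ r ih =>
    intro d hd
    have hs := pvScan_eq lhsIdx d traces
    by_cases he : pvB_skip d (traces.map fun t => (pvB_lcp t.2.2.1 lhsIdx, t.2.2.1)) = []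
    · have h0 : (pvA_scan lhsIdx d traces PySem.Set.empty false).length = 0 := by
        rw [hs, he]; simp [pvB_run, PySem.Set.empty]
      rw [pvA_loop, dif_pos h0]
      simp [pvB_loop, he]
    · have hlen : (pvA_scan lhsIdx d traces PySem.Set.empty false).length =
          (pvB_run d (pvB_skip d (traces.map fun t => (pvB_lcp t.2.2.1 lhsIdx, t.2.2.1))) PySem.Set.empty).length := by
        rw [hs, List.length_map]
      have hpos := pvRun_pos d (traces.map fun t => (pvB_lcp t.2.2.1 lhsIdx, t.2.2.1)) he
      have hne : (pvA_scan lhsIdx d traces PySem.Set.empty false).length ≠ 0 := by omega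
      rw [pvA_loop, dif_neg hne]
      simp only [pvB_loop]
      rw [if_neg he, hlen]
      exact congrArg _ (ih (d + 1) (by omega))

-- ===== VERDICT (by name: the statement is the Claim_ definition above) =====
theorem sibling_nodes_count_at_all_depth_py_spec : Claim_equal_sibling_nodes_count_at_all_depth_py := by
  intro lhs_trace traces _
  unfold Spec_sibling_nodes_count_at_all_depth_py
  unfold sibling_nodes_count_at_all_depth_py sibling_nodes_count_at_all_depth_py_alt
  exact pvLoop_eq lhs_trace.2.2.1 traces (lhs_trace.2.2.1.length + 1) 0 (by omega)
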